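-- pv_equiv track=rewrite | github.com/abfnu090/clinical-trial-eligibility-classification | scripts/consensus.py | merge_umbrella_proposals
-- ===== SOURCE A (Python) =====
-- from collections import Counter
-- from typing import List, Dict, Tuple
--
-- def merge_umbrella_proposals(model_proposals: Dict[str, List[str]],
--                              threshold: int = 3) -> List[str]:
--     """
--     Merge umbrella category proposals using intersection approach.
--
--     Args:
--         model_proposals: Dict mapping model name to list of proposed umbrellas
--         threshold: Minimum number of models that must propose a category
--
--     Returns:
--         List of unified umbrella categories
--     """
--     category_counts = Counter()
--
--     for model, categories in model_proposals.items():
--         for cat in categories: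
--             # Normalize category name for comparison
--             normalized = cat.lower().strip()
--             category_counts[normalized] += 1
--
--     # Keep categories appearing in >= threshold models
--     unified = [cat for cat, count in category_counts.items()
--                if count >= threshold]
--
--     return sorted(unified)
-- ===== SOURCE B (Python) =====
-- from itertools import groupby
-- from typing import List, Dict
--
--
-- def merge_umbrella_proposals(model_proposals: Dict[str, List[str]],
--                              threshold: int = 3) -> List[str]:
--     all_cats = sorted(cat.lower().strip()
--                       for categories in model_proposals.values()
--                       for cat in categories)
--     return [value for value, group in groupby(all_cats)
--             if sum(1 for _ in group) >= threshold]
-- ===== Notes on version B (the rewrite author's own statement) =====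
-- stated objective: alternative
-- what changed: Replaces the Counter-then-filter-then-sort pipeline by flatten-normalize, one global sort, and a groupby run-length scan that emits qualifying categories already in sorted order.
import Mathlib
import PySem

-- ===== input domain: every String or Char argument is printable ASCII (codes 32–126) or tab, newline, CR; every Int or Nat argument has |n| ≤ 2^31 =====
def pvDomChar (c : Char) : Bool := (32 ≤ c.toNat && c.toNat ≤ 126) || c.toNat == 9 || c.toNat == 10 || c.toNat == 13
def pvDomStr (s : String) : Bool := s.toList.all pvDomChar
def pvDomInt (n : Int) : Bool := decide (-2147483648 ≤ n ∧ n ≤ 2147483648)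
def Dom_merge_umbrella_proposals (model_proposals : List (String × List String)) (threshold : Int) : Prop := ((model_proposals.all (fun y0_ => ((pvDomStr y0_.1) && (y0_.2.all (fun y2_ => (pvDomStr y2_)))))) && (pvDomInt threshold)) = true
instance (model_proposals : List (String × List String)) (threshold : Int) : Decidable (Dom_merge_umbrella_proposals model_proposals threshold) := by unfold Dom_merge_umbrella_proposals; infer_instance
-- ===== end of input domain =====

-- B replaces the Counter-then-filter-then-sort pipeline by one global sort of the
-- normalized occurrences followed by a groupby run-length scan (objective: alternative).

-- ===== PORT A =====
def merge_umbrella_proposals (model_proposals : List (String × List String)) (threshold : Int) : List String :=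
  -- category_counts = Counter(); for model, categories in …: for cat in categories: …
  let category_counts : PySem.Dict String Int :=
    model_proposals.foldl (fun d p =>
      p.2.foldl (fun d cat =>
        let normalized := PySem.Str.strip (PySem.Str.lower cat)
        d.modify normalized 0 (· + 1)) d) PySem.Dict.empty
  -- unified = [cat for cat, count in category_counts.items() if count >= threshold]
  let unified := (category_counts.items.filter (fun p => decide (threshold ≤ p.2))).map (·.1)
  PySem.List.sorted unified (fun x => x) false

-- ===== PORT B =====
-- normalization used in B's generator expression
def pvNorm (cat : String) : String := PySem.Str.strip (PySem.Str.lower cat)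

-- itertools.groupby over a list: the runs of equal adjacent values with their lengths
-- ((value, sum(1 for _ in group)) for each group)
def pvRuns : List String → List (String × Nat)
  | [] => []
  | x :: rest => (x, (rest.takeWhile (· == x)).length + 1) :: pvRuns (rest.dropWhile (· == x))
termination_by s => s.length
decreasing_by
  simp only [List.length_cons]
  exact Nat.lt_succ_of_le (List.length_dropWhile_le _ _)

def merge_umbrella_proposals_alt (model_proposals : List (String × List String)) (threshold : Int) : List String :=
  let all_cats := PySem.List.sorted
    (model_proposals.flatMap (fun p => p.2.map pvNorm)) (fun x => x) false
  ((pvRuns all_cats).filter (fun r => decide (threshold ≤ (r.2 : Int)))).map (·.1)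

-- ===== PRECONDITION & SPEC =====
def Spec_merge_umbrella_proposals (model_proposals : List (String × List String)) (threshold : Int) (out : List String) : Prop := out = merge_umbrella_proposals_alt model_proposals threshold
instance (model_proposals : List (String × List String)) (threshold : Int) (out : List String) : Decidable (Spec_merge_umbrella_proposals model_proposals threshold out) := by unfold Spec_merge_umbrella_proposals; infer_instance

-- ===== CLAIM (what is proved, stated in full; the proofs are below) =====
def Claim_equal_merge_umbrella_proposals : Prop := ∀ (model_proposals : List (String × List String)) (threshold : Int), Dom_merge_umbrella_proposals model_proposals threshold → Spec_merge_umbrella_proposals model_proposals threshold (merge_umbrella_proposals model_proposals threshold)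

-- ===== LEMMAS AND PROOFS =====

-- A's side reduced: the nested counting loop is Counter over the flattened normalized
-- occurrence list, so A returns sorted(distinct categories with count ≥ threshold).
theorem portA_eq (mp : List (String × List String)) (t : Int) :
    merge_umbrella_proposals mp t =
      PySem.List.sorted
        ((PySem.Set.ofList (mp.flatMap (fun p => p.2.map pvNorm))).filter
          (fun k => decide (t ≤ ((mp.flatMap (fun p => p.2.map pvNorm)).count k : Int))))
        (fun x => x) false := by
  have hc : (mp.foldl (fun d p =>
      p.2.foldl (fun d cat => d.modify (PySem.Str.strip (PySem.Str.lower cat)) 0 (· + 1)) d)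
      PySem.Dict.empty)
      = PySem.Dict.counter (mp.flatMap (fun p => p.2.map pvNorm)) := by
    rw [PySem.Dict.counter_eq_foldl, List.flatMap_def, List.foldl_flatten, List.foldl_map]
    simp only [List.foldl_map, pvNorm]
  show PySem.List.sorted
      (((mp.foldl (fun d p =>
        p.2.foldl (fun d cat => d.modify (PySem.Str.strip (PySem.Str.lower cat)) 0 (· + 1)) d)
        PySem.Dict.empty).items.filter (fun p => decide (t ≤ p.2))).map (·.1)) (fun x => x) false = _
  rw [hc, PySem.Dict.items_counter, List.filter_map, List.map_map]
  simp [Function.comp_def]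

-- on a ≤-sorted list whose elements all dominate x, dropping the leading x-run removes every x
theorem pv_not_mem_dropWhile (x : String) (l : List String)
    (hsort : l.Pairwise (· ≤ ·)) (hle : ∀ y ∈ l, x ≤ y) : x ∉ l.dropWhile (· == x) := by
  intro hmem
  cases h : l.dropWhile (· == x) with
  | nil => rw [h] at hmem; cases hmem
  | cons h0 tl =>
    rw [h] at hmem
    have hne : l.dropWhile (· == x) ≠ [] := by rw [h]; simp
    have hh := List.head_dropWhile_not (· == x) hne
    have hh0 : h0 ≠ x := by
      have he : (l.dropWhile (· == x)).head hne = h0 := by simp [h]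
      rw [he] at hh
      simpa using hh
    have hsub : (h0 :: tl).Sublist l := h ▸ List.dropWhile_sublist _
    have hpw : (h0 :: tl).Pairwise (· ≤ ·) := hsort.sublist hsub
    have hxh0 : x ≤ h0 := hle _ (hsub.mem List.mem_cons_self)
    rcases List.mem_cons.mp hmem with h1 | h1
    · exact hh0 h1.symm
    · exact hh0 (le_antisymm (List.rel_of_pairwise_cons hpw h1) hxh0)

-- the runs of a ≤-sorted list: heads are ≤-sorted and distinct, lengths are the counts,
-- and every element of the list heads some run
theorem pvRuns_spec : ∀ (n : Nat) (s : List String), s.length ≤ n → s.Pairwise (· ≤ ·) →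
    ((pvRuns s).map (·.1)).Pairwise (· ≤ ·) ∧ ((pvRuns s).map (·.1)).Nodup ∧
    (∀ k m, (k, m) ∈ pvRuns s → m = s.count k ∧ k ∈ s) ∧
    (∀ k, k ∈ s → k ∈ (pvRuns s).map (·.1)) := by
  intro n
  induction n with
  | zero =>
    intro s hs _
    have : s = [] := List.length_eq_zero_iff.mp (Nat.le_zero.mp hs)
    subst this
    simp [pvRuns]
  | succ n ih =>
    intro s hlen hsort
    match s with
    | [] => simp [pvRuns]
    | x :: rest =>
      have hsplit : rest.takeWhile (· == x) ++ rest.dropWhile (· == x) = rest :=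
        List.takeWhile_append_dropWhile
      set grp := rest.takeWhile (· == x) with hgrp
      set rest' := rest.dropWhile (· == x) with hrest'
      have hgrp_eq : ∀ y ∈ grp, y = x := by
        intro y hy
        have := List.mem_takeWhile_imp hy
        simpa using this
      have hrest'_sub : rest'.Sublist rest := List.dropWhile_sublist _
      have hx_le : ∀ y ∈ rest, x ≤ y := by
        intro y hy
        exact (List.pairwise_cons.mp hsort).1 y hy
      have hsort_rest : rest.Pairwise (· ≤ ·) := (List.pairwise_cons.mp hsort).2
      have hsort' : rest'.Pairwise (· ≤ ·) := hsort_rest.sublist hrest'_sub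
      have hx_not : x ∉ rest' := by
        rw [hrest']
        exact pv_not_mem_dropWhile x rest hsort_rest hx_le
      have hrest'_mem : ∀ y ∈ rest', y ∈ rest := fun y hy => hrest'_sub.mem hy
      have hrest'_ne_x : ∀ y ∈ rest', y ≠ x := fun y hy h => hx_not (h ▸ hy)
      have hlen' : rest'.length ≤ n := by
        have h1 := List.length_dropWhile_le (· == x) rest
        simp only [List.length_cons] at hlen
        rw [hrest']
        omega
      obtain ⟨ihp, ihn, ihc, ihm⟩ := ih rest' hlen' hsort'
      have hruns : pvRuns (x :: rest) = (x, grp.length + 1) :: pvRuns rest' := by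
        rw [pvRuns]
      have hfst_mem : ∀ k, k ∈ (pvRuns rest').map (·.1) → k ∈ rest' := by
        intro k hk
        obtain ⟨⟨k', m⟩, hmem, hq⟩ := List.mem_map.mp hk
        cases hq
        exact (ihc _ _ hmem).2
      refine ⟨?_, ?_, ?_, ?_⟩
      · rw [hruns]
        simp only [List.map_cons]
        refine List.pairwise_cons.mpr ⟨?_, ihp⟩
        intro k hk
        exact hx_le k (hrest'_mem k (hfst_mem k hk))
      · rw [hruns]
        simp only [List.map_cons]
        refine List.nodup_cons.mpr ⟨?_, ihn⟩
        intro hk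
        exact hx_not (hfst_mem x hk)
      · intro k m hm
        rw [hruns] at hm
        rcases List.mem_cons.mp hm with h | h
        · cases h
          constructor
          · have hcg : grp.count x = grp.length := by
              apply List.count_eq_length.mpr
              intro y hy
              exact ((hgrp_eq y hy).symm ▸ rfl)
            have hcr : rest'.count x = 0 := List.count_eq_zero.mpr hx_not
            have hcx : (x :: rest).count x = grp.length + 1 := by
              rw [← hsplit]
              simp [List.count_append, hcg, hcr]
            rw [hcx]
          · exact List.mem_cons_self
        · obtain ⟨hcnt, hmem⟩ := ihc k m h
          have hkx : k ≠ x := hrest'_ne_x k hmem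
          constructor
          · have hcg : grp.count k = 0 := by
              apply List.count_eq_zero.mpr
              intro hkg
              exact hkx (hgrp_eq k hkg)
            have hck : (x :: rest).count k = rest'.count k := by
              rw [List.count_cons_of_ne (Ne.symm hkx), ← hsplit, List.count_append, hcg,
                Nat.zero_add]
            rw [hck]
            exact hcnt
          · exact List.mem_cons_of_mem _ (hrest'_mem k hmem)
      · intro k hk
        rw [hruns]
        simp only [List.map_cons, List.mem_cons]
        rcases List.mem_cons.mp hk with h | h
        · exact Or.inl h
        · rw [← hsplit] at h
          rcases List.mem_append.mp h with h | h
          · exact Or.inl (hgrp_eq k h)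
          · exact Or.inr (ihm k h)

-- ===== VERDICT (by name: the statement is the Claim_ definition above) =====
theorem merge_umbrella_proposals_spec : Claim_equal_merge_umbrella_proposals := by
  intro mp t _
  unfold Spec_merge_umbrella_proposals
  rw [portA_eq]
  set ms := mp.flatMap (fun p => p.2.map pvNorm) with hms
  set s := PySem.List.sorted ms (fun x => x) false with hs
  have hperm : s.Perm ms := PySem.List.sorted_perm ms (fun x => x) false
  have hsort : s.Pairwise (· ≤ ·) := PySem.List.sorted_pairwise ms (fun x => x)
  obtain ⟨hp, hn, hc, hm⟩ := pvRuns_spec s.length s le_rfl hsort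
  set q : String → Bool := fun k => decide (t ≤ (ms.count k : Int)) with hq
  set lhsList := PySem.List.sorted ((PySem.Set.ofList ms).filter q) (fun x => x) false with hlhs
  set rhsList := ((pvRuns s).filter (fun r => decide (t ≤ (r.2 : Int)))).map (·.1) with hrhs
  show lhsList = rhsList
  have hlperm : lhsList.Perm ((PySem.Set.ofList ms).filter q) :=
    PySem.List.sorted_perm _ _ _
  -- rhs is a sublist of the run heads
  have hrsub : rhsList.Sublist ((pvRuns s).map (·.1)) := List.Sublist.map _ List.filter_sublist
  -- memberships
  have hmem_l : ∀ k, k ∈ lhsList ↔ (k ∈ ms ∧ t ≤ (ms.count k : Int)) := by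
    intro k
    rw [hlperm.mem_iff, List.mem_filter, PySem.Set.mem_ofList, hq]
    simp
  have hmem_r : ∀ k, k ∈ rhsList ↔ (k ∈ ms ∧ t ≤ (ms.count k : Int)) := by
    intro k
    constructor
    · intro hk
      obtain ⟨⟨k', m⟩, hmem, hfst⟩ := List.mem_map.mp hk
      cases hfst
      obtain ⟨hmem', hq'⟩ := List.mem_filter.mp hmem
      obtain ⟨hcnt, hks⟩ := hc _ _ hmem'
      refine ⟨hperm.mem_iff.mp hks, ?_⟩
      rw [← hperm.count_eq, ← hcnt]
      simpa using hq'
    · rintro ⟨hk, hcnt⟩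
      have hks : k ∈ s := hperm.mem_iff.mpr hk
      obtain ⟨⟨k', m⟩, hmem, hfst⟩ := List.mem_map.mp (hm k hks)
      simp only at hfst
      subst hfst
      apply List.mem_map.mpr
      refine ⟨(k', m), List.mem_filter.mpr ⟨hmem, ?_⟩, rfl⟩
      have := (hc _ _ hmem).1
      subst this
      simp only [decide_eq_true_eq]
      rw [hperm.count_eq]
      exact hcnt
  -- nodup on both sides
  have hnod_l : lhsList.Nodup :=
    hlperm.nodup_iff.mpr ((PySem.Set.nodup_ofList ms).filter q)
  have hnod_r : rhsList.Nodup := hn.sublist hrsub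
  -- pairwise on both sides
  have hpw_l : lhsList.Pairwise (· ≤ ·) := PySem.List.sorted_pairwise _ _
  have hpw_r : rhsList.Pairwise (· ≤ ·) := hp.sublist hrsub
  have hpermlr : lhsList.Perm rhsList := by
    rw [List.perm_ext_iff_of_nodup hnod_l hnod_r]
    intro a
    rw [hmem_l, hmem_r]
  exact PySem.List.eq_of_perm_of_pairwise_le_of_injective (fun x => x)
    (fun _ _ h => h) hpermlr hpw_l hpw_r
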